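-- pv_equiv track=rewrite | github.com/fp-computer-programming/hw-8-2-P22inolan | hw8-2-5.py | sum_no_odds
-- ===== SOURCE A (Python) =====
-- def sum_no_odds(num):
--     total = 0
--     for x in num:
--         if x % 2 == 0:
--             total += x
--         elif x % 2 != 0:
--             return total
--     return total
-- ===== SOURCE B (Python) =====
-- def sum_no_odds(num):
--     # Stage 1: locate the boundary -- index of the first odd element
--     # (len(num) if there is none).
--     k = next((i for i, x in enumerate(num) if x % 2 != 0), len(num))
--     # Stage 2: sum the prefix before that boundary.
--     return sum(num[:k])
-- ===== Notes on version B (the rewrite author's own statement) =====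
-- stated objective: alternative
-- what changed: Replaces the single accumulate-and-early-return loop by two staged passes: first a search computing the index k of the first odd element, then summing the slice num[:k].
import Mathlib
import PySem

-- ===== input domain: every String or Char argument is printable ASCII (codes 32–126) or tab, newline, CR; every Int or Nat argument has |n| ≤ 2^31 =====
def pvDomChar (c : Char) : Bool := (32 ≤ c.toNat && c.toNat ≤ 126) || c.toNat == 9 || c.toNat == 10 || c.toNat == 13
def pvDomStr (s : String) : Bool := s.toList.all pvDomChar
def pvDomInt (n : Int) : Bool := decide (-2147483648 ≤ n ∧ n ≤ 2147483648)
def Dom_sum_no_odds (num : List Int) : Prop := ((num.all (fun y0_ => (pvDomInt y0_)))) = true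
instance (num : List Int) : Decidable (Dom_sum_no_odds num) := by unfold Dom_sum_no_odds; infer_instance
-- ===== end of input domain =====

-- B replaces A's accumulate-and-early-return loop by two staged passes: find the index of the first odd element, then sum the prefix slice before it (alternative decomposition; same cost).

-- ===== PORT A =====
-- A: loop with accumulator, returning early on the first odd element
def sumNoOddsGo (xs : List Int) (total : Int) : Int :=
  match xs with
  | [] => total
  | x :: rest =>
    if PySem.Int.mod x 2 = 0 then sumNoOddsGo rest (total + x)
    else total

def sum_no_odds (num : List Int) : Int := sumNoOddsGo num 0

-- ===== PORT B =====
-- B stage 1: k = next((i for i, x in enumerate(num) if x % 2 != 0), len(num))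
def sum_no_odds_alt (num : List Int) : Int :=
  let k : Int := ((PySem.List.enumerate num).find? (fun p => PySem.Int.mod p.2 2 != 0)).elim
      (Int.ofNat num.length) (fun p => p.1)
  -- B stage 2: sum(num[:k])
  (PySem.List.slice num none (some k)).sum

-- ===== PRECONDITION & SPEC =====
def Spec_sum_no_odds (num : List Int) (out : Int) : Prop := out = sum_no_odds_alt num
instance (num : List Int) (out : Int) : Decidable (Spec_sum_no_odds num out) := by unfold Spec_sum_no_odds; infer_instance

-- ===== CLAIM (what is proved, stated in full; the proofs are below) =====
def Claim_equal_sum_no_odds : Prop := ∀ (num : List Int), Dom_sum_no_odds num → Spec_sum_no_odds num (sum_no_odds num)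

-- ===== LEMMAS AND PROOFS =====
lemma sumNoOddsGo_eq (xs : List Int) (t : Int) :
    sumNoOddsGo xs t = t + (xs.takeWhile (fun x => PySem.Int.mod x 2 == 0)).sum := by
  induction xs generalizing t with
  | nil => simp [sumNoOddsGo]
  | cons x rest ih =>
    simp only [sumNoOddsGo, List.takeWhile_cons]
    by_cases hm : PySem.Int.mod x 2 = 0
    · rw [if_pos hm, ih, if_pos (by rw [hm]; rfl : (PySem.Int.mod x 2 == 0) = true)]
      simp; ring
    · rw [if_neg hm, if_neg (by simpa using hm : ¬ (PySem.Int.mod x 2 == 0) = true)]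
      simp

lemma find_enum_eq (xs : List Int) (s : Int) :
    ((PySem.List.enumerate xs s).find? (fun p => PySem.Int.mod p.2 2 != 0)).elim
        (s + Int.ofNat xs.length) (fun p => p.1)
      = s + Int.ofNat (xs.takeWhile (fun x => PySem.Int.mod x 2 == 0)).length := by
  induction xs generalizing s with
  | nil => simp [PySem.List.enumerate_nil]
  | cons x rest ih =>
    rw [PySem.List.enumerate_cons, List.find?_cons, List.takeWhile_cons]
    by_cases hm : PySem.Int.mod x 2 = 0
    · have hc : (PySem.Int.mod x 2 != 0) = false := by rw [hm]; rfl
      rw [if_pos (by rw [hm]; rfl : (PySem.Int.mod x 2 == 0) = true)]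
      simp only [hc]
      have hd : s + Int.ofNat (x :: rest).length = (s + 1) + Int.ofNat rest.length := by
        simp only [List.length_cons, Int.ofNat_eq_natCast]; push_cast; ring
      rw [hd, ih (s + 1), List.length_cons]
      simp only [Int.ofNat_eq_natCast]; push_cast; ring
    · have hc : (PySem.Int.mod x 2 != 0) = true := by
        simp only [bne_iff_ne, ne_eq]; exact hm
      rw [if_neg (by simpa using hm : ¬ (PySem.Int.mod x 2 == 0) = true)]
      simp only [hc]
      simp

lemma alt_eq_takeWhile (num : List Int) :
    sum_no_odds_alt num = (num.takeWhile (fun x => PySem.Int.mod x 2 == 0)).sum := by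
  have h := find_enum_eq num 0
  simp only [zero_add, Int.ofNat_eq_natCast] at h
  simp only [sum_no_odds_alt, Int.ofNat_eq_natCast]
  rw [h, PySem.List.slice_to_natCast,
    ← List.prefix_iff_eq_take.mp (List.takeWhile_prefix _)]

theorem sum_no_odds_spec : Claim_equal_sum_no_odds := by
  intro num _
  unfold Spec_sum_no_odds sum_no_odds
  rw [alt_eq_takeWhile]
  simpa using sumNoOddsGo_eq num 0
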